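-- pv_equiv track=rewrite | github.com/omarkhaled-auto/super-team | src/contract_engine/services/breaking_change_detector.py | _extract_body_schema
-- ===== SOURCE A (Python) =====
-- from typing import Any
--
-- def _extract_body_schema(body: dict[str, Any]) -> dict[str, Any] | None:
--     """Extract the JSON schema from a request body content object."""
--     content = body.get("content") or {}
--     for media_type in ("application/json", "application/xml", "text/plain"):
--         media = content.get(media_type)
--         if isinstance(media, dict) and "schema" in media:
--             return media["schema"]
--     # Fallback: pick the first media type with a schema
--     for media in content.values():
--         if isinstance(media, dict) and "schema" in media:
--             return media["schema"]
--     return None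
-- ===== SOURCE B (Python) =====
-- def _extract_body_schema(body):
--     """Extract the JSON schema from a request body content object."""
--     content = body.get("content") or {}
--     priority = {"application/json": 0, "application/xml": 1, "text/plain": 2}
--     best = None  # ((rank, position), schema) with the lexicographically smallest key
--     for pos, (media_type, media) in enumerate(content.items()):
--         if isinstance(media, dict) and "schema" in media:
--             key = (priority.get(media_type, 3), pos)
--             if best is None or key < best[0]:
--                 best = (key, media["schema"])
--     return None if best is None else best[1]
-- ===== Notes on version B (the rewrite author's own statement) =====
-- stated objective: alternative
-- what changed: B replaces A's staged algorithm (three preferred-key lookups, then a fallback scan over all values) by a single pass over content.items() that ranks every schema-bearing entry with a (priority, position) key and keeps the lexicographic minimum; the Lean claim is restricted by Pre_ to content association lists without duplicate keys, which cannot arise from a Python dict.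
import Mathlib
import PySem

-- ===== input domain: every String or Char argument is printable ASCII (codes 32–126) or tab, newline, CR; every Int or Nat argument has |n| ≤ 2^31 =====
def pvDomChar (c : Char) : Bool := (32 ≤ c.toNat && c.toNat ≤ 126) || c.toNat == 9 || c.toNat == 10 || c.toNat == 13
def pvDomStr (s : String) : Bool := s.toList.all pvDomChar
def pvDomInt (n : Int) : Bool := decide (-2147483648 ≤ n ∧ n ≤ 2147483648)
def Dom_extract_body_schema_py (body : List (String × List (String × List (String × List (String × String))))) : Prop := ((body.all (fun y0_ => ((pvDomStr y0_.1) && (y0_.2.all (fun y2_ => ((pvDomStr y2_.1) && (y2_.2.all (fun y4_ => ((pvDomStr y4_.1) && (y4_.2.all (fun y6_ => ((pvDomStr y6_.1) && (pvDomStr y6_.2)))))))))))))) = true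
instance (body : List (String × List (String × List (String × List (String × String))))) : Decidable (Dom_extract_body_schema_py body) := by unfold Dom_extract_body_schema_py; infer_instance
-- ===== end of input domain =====

-- B replaces A's staged preferred lookups + fallback scan by one pass keeping the (priority-rank, position)-minimal schema entry (objective: alternative).

-- dict.get on an insertion-ordered association list (first match); shared Python-dict primitive of both ports
def pvGet {α : Type} (l : List (String × α)) (k : String) : Option α :=
  match l with
  | [] => none
  | (k', v) :: rest => if k' == k then some v else pvGet rest k

-- ===== PORT A =====
-- A's second loop: for media in content.values(): …
def pvA_loop2 (vs : List (List (String × List (String × String)))) : Option (List (String × String)) :=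
  match vs with
  | [] => none
  | media :: rest =>
    match pvGet media "schema" with
    | some s => some s
    | none => pvA_loop2 rest

-- A's first loop over the three preferred media types; falls through to the second loop
def pvA_loop1 (content : List (String × List (String × List (String × String)))) (mts : List String) : Option (List (String × String)) :=
  match mts with
  | [] => pvA_loop2 (content.map (·.2))
  | mt :: rest =>
    match pvGet content mt with
    | some media =>
      match pvGet media "schema" with
      | some s => some s
      | none => pvA_loop1 content rest
    | none => pvA_loop1 content rest

def extract_body_schema_py (body : List (String × List (String × List (String × List (String × String))))) : Option (List (String × String)) :=
  let content := match pvGet body "content" with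
    | some c => if c = [] then [] else c   -- `body.get("content") or {}`: empty dict is falsy
    | none => []
  pvA_loop1 content ["application/json", "application/xml", "text/plain"]

-- ===== PORT B =====
-- priority.get(media_type, 3)
def pvRank (mt : String) : Nat :=
  (pvGet [("application/json", 0), ("application/xml", 1), ("text/plain", 2)] mt).getD 3

-- Python tuple comparison `key < best[0]` on (rank, position)
def pvLtKey (a b : Nat × Nat) : Bool := decide (a.1 < b.1 ∨ (a.1 = b.1 ∧ a.2 < b.2))

-- body of B's for-loop: update `best` from one (pos, media_type, media) item
def pvB_step (best : Option ((Nat × Nat) × List (String × String))) (pos : Nat)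
    (mt : String) (media : List (String × List (String × String))) :
    Option ((Nat × Nat) × List (String × String)) :=
  match pvGet media "schema" with
  | none => best
  | some s =>
    let key := (pvRank mt, pos)
    match best with
    | none => some (key, s)
    | some b => if pvLtKey key b.1 then some (key, s) else some b

-- B's loop: for pos, (media_type, media) in enumerate(content.items()): …
def pvB_loop (pos : Nat) (best : Option ((Nat × Nat) × List (String × String)))
    (items : List (String × List (String × List (String × String)))) :
    Option ((Nat × Nat) × List (String × String)) :=
  match items with
  | [] => best
  | (mt, media) :: rest => pvB_loop (pos + 1) (pvB_step best pos mt media) rest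

def extract_body_schema_py_alt (body : List (String × List (String × List (String × List (String × String))))) : Option (List (String × String)) :=
  let content := match pvGet body "content" with
    | some c => if c = [] then [] else c
    | none => []
  (pvB_loop 0 none content).map (·.2)

-- ===== PRECONDITION & SPEC =====
-- Pre_ excludes association lists whose "content" entry has duplicate media-type keys: such inputs
-- represent no Python dict (dict keys are unique), so any behaviour on them is an accident of the
-- list encoding (A consults only the first occurrence of a preferred key, B ranks every occurrence).
def Pre_extract_body_schema_py (body : List (String × List (String × List (String × List (String × String))))) : Prop :=
  ((((body.lookup "content").getD []).map Prod.fst)).Nodup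
instance (body : List (String × List (String × List (String × List (String × String))))) : Decidable (Pre_extract_body_schema_py body) := by unfold Pre_extract_body_schema_py; infer_instance

def pvWitness_extract_body_schema_py : (List (String × List (String × List (String × List (String × String))))) :=
  [("content", [("text/plain", [("schema", [("type", "string")])]), ("application/json", [("schema", [("type", "object")])])])]

def Spec_extract_body_schema_py (body : List (String × List (String × List (String × List (String × String))))) (out : Option (List (String × String))) : Prop := out = extract_body_schema_py_alt body
instance (body : List (String × List (String × List (String × List (String × String))))) (out : Option (List (String × String))) : Decidable (Spec_extract_body_schema_py body out) := by unfold Spec_extract_body_schema_py; infer_instance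

-- ===== CLAIM (what is proved, stated in full; the proofs are below) =====
def Claim_equal_extract_body_schema_py : Prop := ∀ (body : List (String × List (String × List (String × List (String × String))))), Dom_extract_body_schema_py body → Pre_extract_body_schema_py body → Spec_extract_body_schema_py body (extract_body_schema_py body)

-- ===== LEMMAS AND PROOFS =====

-- pvGet is Python dict.get, i.e. first-match lookup: it coincides with List.lookup
theorem pvGet_eq_lookup {α : Type} (l : List (String × α)) (k : String) :
    pvGet l k = l.lookup k := by
  induction l with
  | nil => rfl
  | cons p rest ih =>
    obtain ⟨k', v⟩ := p
    by_cases h : k' = k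
    · subst h; simp [pvGet, List.lookup]
    · have h1 : (k' == k) = false := by simpa [beq_eq_false_iff_ne] using h
      have h2 : (k == k') = false := by
        simp only [beq_eq_false_iff_ne]; exact fun e => h e.symm
      simp [pvGet, List.lookup, h1, h2, ih]

-- staged characterisation of A's loop over the three preferred media types
def pvOget (content : List (String × List (String × List (String × String)))) (k : String) :
    Option (List (String × String)) :=
  match pvGet content k with
  | some m => pvGet m "schema"
  | none => none

def pvStagedA (c : List (String × List (String × List (String × String)))) : Option (List (String × String)) :=
  match pvOget c "application/json" with
  | some s => some s
  | none =>
    match pvOget c "application/xml" with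
    | some s => some s
    | none =>
      match pvOget c "text/plain" with
      | some s => some s
      | none => pvA_loop2 (c.map (·.2))

def pvMinRank (c : List (String × List (String × List (String × String)))) : Nat :=
  if (pvOget c "application/json").isSome then 0
  else if (pvOget c "application/xml").isSome then 1
  else if (pvOget c "text/plain").isSome then 2
  else 3

theorem pvA_eq_staged (c : List (String × List (String × List (String × String)))) :
    pvA_loop1 c ["application/json", "application/xml", "text/plain"] = pvStagedA c := by
  simp only [pvA_loop1, pvStagedA, pvOget]
  cases hj : pvGet c "application/json" with
  | none =>
    cases hx : pvGet c "application/xml" with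
    | none =>
      cases ht : pvGet c "text/plain" with
      | none => rfl
      | some m => cases hm : pvGet m "schema" <;> simp [hm]
    | some m =>
      cases hm : pvGet m "schema" with
      | none =>
        cases ht : pvGet c "text/plain" with
        | none => simp [hm]
        | some m2 => cases hm2 : pvGet m2 "schema" <;> simp [hm, hm2]
      | some s => simp [hm]
  | some m =>
    cases hm : pvGet m "schema" with
    | none =>
      cases hx : pvGet c "application/xml" with
      | none =>
        cases ht : pvGet c "text/plain" with
        | none => simp [hm]
        | some m2 => cases hm2 : pvGet m2 "schema" <;> simp [hm, hm2]
      | some m2 =>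
        cases hm2 : pvGet m2 "schema" with
        | none =>
          cases ht : pvGet c "text/plain" with
          | none => simp [hm, hm2]
          | some m3 => cases hm3 : pvGet m3 "schema" <;> simp [hm, hm2, hm3]
        | some s => simp [hm, hm2]
    | some s => simp [hm]

theorem pvGet_eq_none_of_not_mem {α : Type} (l : List (String × α)) (k : String)
    (h : k ∉ l.map Prod.fst) : pvGet l k = none := by
  induction l with
  | nil => rfl
  | cons p rest ih =>
    simp only [List.map, List.mem_cons, not_or] at h
    have hne : ¬ p.1 = k := fun e => h.1 e.symm
    simp [pvGet, hne, ih h.2]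

theorem pvOget_cons (mt : String) (media : List (String × List (String × String)))
    (rest : List (String × List (String × List (String × String)))) (k : String) :
    pvOget ((mt, media) :: rest) k =
      if mt = k then pvGet media "schema" else pvOget rest k := by
  by_cases h : mt = k <;> simp [pvOget, pvGet, h]

theorem pvRank_other (mt : String) (h1 : mt ≠ "application/json")
    (h2 : mt ≠ "application/xml") (h3 : mt ≠ "text/plain") : pvRank mt = 3 := by
  simp [pvRank, pvGet, beq_iff_eq, Ne.symm h1, Ne.symm h2, Ne.symm h3]

-- merge of two optional (key, schema) candidates: keep the earlier one on ties
def pvMerge (a b : Option ((Nat × Nat) × List (String × String))) :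
    Option ((Nat × Nat) × List (String × String)) :=
  match a, b with
  | none, b => b
  | a, none => a
  | some a', some b' => if pvLtKey b'.1 a'.1 then some b' else some a'

theorem pvMerge_none_left (b : Option ((Nat × Nat) × List (String × String))) :
    pvMerge none b = b := by cases b <;> rfl

theorem pvMerge_none_right (a : Option ((Nat × Nat) × List (String × String))) :
    pvMerge a none = a := by cases a <;> rfl

theorem pvMerge_assoc (a b c : Option ((Nat × Nat) × List (String × String))) :
    pvMerge (pvMerge a b) c = pvMerge a (pvMerge b c) := by
  cases a with
  | none => simp [pvMerge_none_left]
  | some a' =>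
    cases b with
    | none => cases c <;> simp [pvMerge_none_left, pvMerge_none_right]
    | some b' =>
      cases c with
      | none => rw [pvMerge_none_right, pvMerge_none_right]
      | some c' =>
        obtain ⟨⟨a1, a2⟩, av⟩ := a'
        obtain ⟨⟨b1, b2⟩, bv⟩ := b'
        obtain ⟨⟨c1, c2⟩, cv⟩ := c'
        by_cases h1 : pvLtKey (b1, b2) (a1, a2) = true <;>
          by_cases h2 : pvLtKey (c1, c2) (b1, b2) = true <;>
            by_cases h3 : pvLtKey (c1, c2) (a1, a2) = true <;>
              simp [pvMerge, h1, h2, h3] <;>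
                first
                  | rfl
                  | (exfalso
                     simp only [pvLtKey, decide_eq_true_eq, not_or, not_and, not_lt] at h1 h2 h3
                     omega)

theorem pvStep_eq_merge (best : Option ((Nat × Nat) × List (String × String))) (pos : Nat)
    (mt : String) (media : List (String × List (String × String))) :
    pvB_step best pos mt media =
      pvMerge best ((pvGet media "schema").map (fun s => ((pvRank mt, pos), s))) := by
  cases hs : pvGet media "schema" <;> cases best <;> simp [pvB_step, pvMerge, hs]

theorem pvB_loop_merge (items : List (String × List (String × List (String × String)))) :
    ∀ (i : Nat) (best : Option ((Nat × Nat) × List (String × String))),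
      pvB_loop i best items = pvMerge best (pvB_loop i none items) := by
  induction items with
  | nil => intro i best; cases best <;> rfl
  | cons hd rest ih =>
    intro i best
    obtain ⟨mt, media⟩ := hd
    simp only [pvB_loop]
    rw [ih (i + 1) (pvB_step best i mt media), ih (i + 1) (pvB_step none i mt media),
        pvStep_eq_merge, pvStep_eq_merge, pvMerge_none_left, pvMerge_assoc]

theorem pvStaged_none_facts (c : List (String × List (String × List (String × String))))
    (h : pvStagedA c = none) :
    pvOget c "application/json" = none ∧ pvOget c "application/xml" = none ∧
      pvOget c "text/plain" = none := by
  unfold pvStagedA at h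
  cases hj : pvOget c "application/json" with
  | some v => rw [hj] at h; simp at h
  | none =>
    rw [hj] at h
    cases hx : pvOget c "application/xml" with
    | some v => rw [hx] at h; simp at h
    | none =>
      rw [hx] at h
      cases ht : pvOget c "text/plain" with
      | some v => rw [ht] at h; simp at h
      | none => exact ⟨rfl, rfl, rfl⟩

theorem pvMinRank_cases (c : List (String × List (String × List (String × String)))) :
    (pvMinRank c = 0 ∧ pvStagedA c = pvOget c "application/json" ∧
      (pvOget c "application/json").isSome = true) ∨
    (pvMinRank c = 1 ∧ pvOget c "application/json" = none ∧
      pvStagedA c = pvOget c "application/xml" ∧ (pvOget c "application/xml").isSome = true) ∨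
    (pvMinRank c = 2 ∧ pvOget c "application/json" = none ∧ pvOget c "application/xml" = none ∧
      pvStagedA c = pvOget c "text/plain" ∧ (pvOget c "text/plain").isSome = true) ∨
    (pvMinRank c = 3 ∧ pvOget c "application/json" = none ∧ pvOget c "application/xml" = none ∧
      pvOget c "text/plain" = none ∧ pvStagedA c = pvA_loop2 (c.map (·.2))) := by
  cases hj : pvOget c "application/json" with
  | some v => exact Or.inl ⟨by simp [pvMinRank, hj], by simp [pvStagedA, hj], by simp⟩
  | none =>
    cases hx : pvOget c "application/xml" with
    | some v =>
      exact Or.inr (Or.inl ⟨by simp [pvMinRank, hj, hx], rfl, by simp [pvStagedA, hj, hx],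
        by simp⟩)
    | none =>
      cases ht : pvOget c "text/plain" with
      | some v =>
        exact Or.inr (Or.inr (Or.inl ⟨by simp [pvMinRank, hj, hx, ht], rfl, rfl,
          by simp [pvStagedA, hj, hx, ht], by simp⟩))
      | none =>
        exact Or.inr (Or.inr (Or.inr ⟨by simp [pvMinRank, hj, hx, ht], rfl, rfl, rfl,
          by simp [pvStagedA, hj, hx, ht]⟩))

-- the loop invariant: B's running best agrees with A's staged answer and carries the minimal rank
def pvInvQ (c : List (String × List (String × List (String × String)))) (i : Nat)
    (r : Option ((Nat × Nat) × List (String × String))) : Prop :=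
  pvStagedA c = r.map (·.2) ∧
    ∀ rk p s, r = some ((rk, p), s) → rk = pvMinRank c ∧ i ≤ p

theorem pvMAIN (c : List (String × List (String × List (String × String))))
    (hnd : (c.map Prod.fst).Nodup) (i : Nat) : pvInvQ c i (pvB_loop i none c) := by
  induction c generalizing i with
  | nil => exact ⟨rfl, by intro rk p s h; cases h⟩
  | cons hd rest ih =>
    obtain ⟨mt, media⟩ := hd
    simp only [List.map, List.nodup_cons] at hnd
    obtain ⟨hmem, hndr⟩ := hnd
    have hgr : pvGet rest mt = none := pvGet_eq_none_of_not_mem rest mt hmem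
    have ihR := ih hndr (i + 1)
    cases hs : pvGet media "schema" with
    | none =>
      -- head contributes no candidate
      have hloop : pvB_loop i none ((mt, media) :: rest) = pvB_loop (i + 1) none rest := by
        simp [pvB_loop, pvB_step, hs]
      rw [hloop]
      have hoget : ∀ k, pvOget ((mt, media) :: rest) k = pvOget rest k := by
        intro k
        rw [pvOget_cons]
        by_cases h : mt = k
        · subst h; simp [hs, pvOget, hgr]
        · simp [h]
      have hst : pvStagedA ((mt, media) :: rest) = pvStagedA rest := by
        simp [pvStagedA, hoget, pvA_loop2, hs]
      have hmr : pvMinRank ((mt, media) :: rest) = pvMinRank rest := by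
        simp [pvMinRank, hoget]
      unfold pvInvQ at ihR ⊢
      obtain ⟨ih1, ih2⟩ := ihR
      refine ⟨by rw [hst]; exact ih1, ?_⟩
      intro rk p s h
      obtain ⟨h1, h2⟩ := ih2 rk p s h
      exact ⟨by rw [hmr]; exact h1, by omega⟩
    | some s =>
      -- head is a candidate with key (pvRank mt, i)
      have hloop : pvB_loop i none ((mt, media) :: rest) =
          pvMerge (some ((pvRank mt, i), s)) (pvB_loop (i + 1) none rest) := by
        simp only [pvB_loop]
        rw [pvB_loop_merge]
        congr 1
        simp [pvB_step, hs]
      rw [hloop]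
      have hcj := pvOget_cons mt media rest "application/json"
      have hcx := pvOget_cons mt media rest "application/xml"
      have hct := pvOget_cons mt media rest "text/plain"
      have hro : pvOget rest mt = none := by simp [pvOget, hgr]
      have hfall : pvA_loop2 (media :: rest.map (·.2)) = some s := by
        simp [pvA_loop2, hs]
      cases hR : pvB_loop (i + 1) none rest with
      | none =>
        rw [hR] at ihR
        unfold pvInvQ at ihR ⊢
        obtain ⟨ih1, -⟩ := ihR
        obtain ⟨hj0, hx0, ht0⟩ := pvStaged_none_facts rest (by simpa using ih1)
        have hmg : pvMerge (some ((pvRank mt, i), s)) none = some ((pvRank mt, i), s) := rfl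
        rw [hmg]
        refine ⟨?_, ?_⟩
        · by_cases h1 : mt = "application/json"
          · subst h1; simp [pvStagedA, hcj, hs]
          · by_cases h2 : mt = "application/xml"
            · subst h2; simp [pvStagedA, hcj, hcx, hs, hj0]
            · by_cases h3 : mt = "text/plain"
              · subst h3; simp [pvStagedA, hcj, hcx, hct, hs, hj0, hx0]
              · simp [pvStagedA, hcj, hcx, hct, h1, h2, h3, hj0, hx0, ht0, hfall]
        · rintro rk p0 s0 h0
          simp only [Option.some.injEq, Prod.mk.injEq] at h0
          obtain ⟨⟨h5, h6⟩, -⟩ := h0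
          refine ⟨?_, by omega⟩
          rw [← h5]
          by_cases h1 : mt = "application/json"
          · subst h1; simp [pvMinRank, hcj, hs, pvRank, pvGet]
          · by_cases h2 : mt = "application/xml"
            · subst h2; simp [pvMinRank, hcj, hcx, hs, hj0, pvRank, pvGet]
            · by_cases h3 : mt = "text/plain"
              · subst h3; simp [pvMinRank, hcj, hcx, hct, hs, hj0, hx0, pvRank, pvGet]
              · rw [pvRank_other mt h1 h2 h3]
                simp [pvMinRank, hcj, hcx, hct, h1, h2, h3, hj0, hx0, ht0]
      | some b =>
        obtain ⟨⟨r, p⟩, s'⟩ := b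
        rw [hR] at ihR
        unfold pvInvQ at ihR ⊢
        obtain ⟨ih1, ih2⟩ := ihR
        have ih1' : pvStagedA rest = some s' := by simpa using ih1
        obtain ⟨hr, hp⟩ := ih2 r p s' rfl
        by_cases h1 : mt = "application/json"
        · -- head rank 0: the rest's minimum has rank ≥ 1, so the head wins
          subst h1
          have hK : pvRank "application/json" = 0 := by decide
          have hrge : 1 ≤ r := by
            rw [hr]; simp only [pvMinRank, hro, Option.isSome_none]
            simp only [Bool.false_eq_true, if_false]
            split_ifs <;> omega
          have hlt : pvLtKey (r, p) (0, i) = false := by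
            simp only [pvLtKey, decide_eq_false_iff_not, not_or, not_and, not_lt]; omega
          have hmg : pvMerge (some ((pvRank "application/json", i), s)) (some ((r, p), s')) =
              some ((0, i), s) := by
            rw [hK]; simp [pvMerge, hlt]
          rw [hmg]
          refine ⟨by simp [pvStagedA, hcj, hs], ?_⟩
          rintro rk p0 s0 h0
          simp only [Option.some.injEq, Prod.mk.injEq] at h0
          obtain ⟨⟨h5, h6⟩, -⟩ := h0
          exact ⟨by rw [← h5]; simp [pvMinRank, hcj, hs], by omega⟩
        · by_cases h2 : mt = "application/xml"
          · -- head rank 1; the rest may only beat it with a json entry (rank 0)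
            subst h2
            have hK : pvRank "application/xml" = 1 := by decide
            rcases pvMinRank_cases rest with ⟨e0, est, _⟩ | ⟨_, _, _, eis⟩ |
              ⟨e2, ej, _, _, _⟩ | ⟨e3, ej, _, _, _⟩
            · -- rest has a json schema: the rest wins
              have hr0 : r = 0 := hr.trans e0
              subst hr0
              rw [est] at ih1'
              have hlt : pvLtKey (0, p) (1, i) = true := by simp [pvLtKey]
              have hmg : pvMerge (some ((pvRank "application/xml", i), s)) (some ((0, p), s')) =
                  some ((0, p), s') := by rw [hK]; simp [pvMerge, hlt]
              rw [hmg]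
              refine ⟨by simp [pvStagedA, hcj, ih1'], ?_⟩
              rintro rk p0 s0 h0
              simp only [Option.some.injEq, Prod.mk.injEq] at h0
              obtain ⟨⟨h5, h6⟩, -⟩ := h0
              exact ⟨by rw [← h5]; simp [pvMinRank, hcj, ih1'], by omega⟩
            · -- rank-1 minimum in rest contradicts nodup (no second xml key)
              rw [hro] at eis; simp at eis
            · -- rest minimum has rank 2: the head wins
              have hr2 : r = 2 := hr.trans e2
              subst hr2
              have hlt : pvLtKey (2, p) (1, i) = false := by
                simp only [pvLtKey, decide_eq_false_iff_not, not_or, not_and, not_lt]; omega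
              have hmg : pvMerge (some ((pvRank "application/xml", i), s)) (some ((2, p), s')) =
                  some ((1, i), s) := by rw [hK]; simp [pvMerge, hlt]
              rw [hmg]
              refine ⟨by simp [pvStagedA, hcj, hcx, ej, hs], ?_⟩
              rintro rk p0 s0 h0
              simp only [Option.some.injEq, Prod.mk.injEq] at h0
              obtain ⟨⟨h5, h6⟩, -⟩ := h0
              exact ⟨by rw [← h5]; simp [pvMinRank, hcj, hcx, ej, hs], by omega⟩
            · -- rest minimum has rank 3: the head wins
              have hr3 : r = 3 := hr.trans e3
              subst hr3
              have hlt : pvLtKey (3, p) (1, i) = false := by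
                simp only [pvLtKey, decide_eq_false_iff_not, not_or, not_and, not_lt]; omega
              have hmg : pvMerge (some ((pvRank "application/xml", i), s)) (some ((3, p), s')) =
                  some ((1, i), s) := by rw [hK]; simp [pvMerge, hlt]
              rw [hmg]
              refine ⟨by simp [pvStagedA, hcj, hcx, ej, hs], ?_⟩
              rintro rk p0 s0 h0
              simp only [Option.some.injEq, Prod.mk.injEq] at h0
              obtain ⟨⟨h5, h6⟩, -⟩ := h0
              exact ⟨by rw [← h5]; simp [pvMinRank, hcj, hcx, ej, hs], by omega⟩
          · by_cases h3 : mt = "text/plain"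
            · -- head rank 2
              subst h3
              have hK : pvRank "text/plain" = 2 := by decide
              rcases pvMinRank_cases rest with ⟨e0, est, _⟩ | ⟨e1, ej, est, _⟩ |
                ⟨_, _, _, _, eis⟩ | ⟨e3, ej, ex, _, _⟩
              · -- rest has a json schema: the rest wins
                have hr0 : r = 0 := hr.trans e0
                subst hr0
                rw [est] at ih1'
                have hlt : pvLtKey (0, p) (2, i) = true := by simp [pvLtKey]
                have hmg : pvMerge (some ((pvRank "text/plain", i), s)) (some ((0, p), s')) =
                    some ((0, p), s') := by rw [hK]; simp [pvMerge, hlt]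
                rw [hmg]
                refine ⟨by simp [pvStagedA, hcj, ih1'], ?_⟩
                rintro rk p0 s0 h0
                simp only [Option.some.injEq, Prod.mk.injEq] at h0
                obtain ⟨⟨h5, h6⟩, -⟩ := h0
                exact ⟨by rw [← h5]; simp [pvMinRank, hcj, ih1'], by omega⟩
              · -- rest has an xml schema: the rest wins
                have hr1 : r = 1 := hr.trans e1
                subst hr1
                rw [est] at ih1'
                have hlt : pvLtKey (1, p) (2, i) = true := by simp [pvLtKey]
                have hmg : pvMerge (some ((pvRank "text/plain", i), s)) (some ((1, p), s')) =
                    some ((1, p), s') := by rw [hK]; simp [pvMerge, hlt]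
                rw [hmg]
                refine ⟨by simp [pvStagedA, hcj, hcx, ej, ih1'], ?_⟩
                rintro rk p0 s0 h0
                simp only [Option.some.injEq, Prod.mk.injEq] at h0
                obtain ⟨⟨h5, h6⟩, -⟩ := h0
                exact ⟨by rw [← h5]; simp [pvMinRank, hcj, hcx, ej, ih1'], by omega⟩
              · -- rank-2 minimum in rest contradicts nodup (no second text/plain key)
                rw [hro] at eis; simp at eis
              · -- rest minimum has rank 3: the head wins
                have hr3 : r = 3 := hr.trans e3
                subst hr3
                have hlt : pvLtKey (3, p) (2, i) = false := by
                  simp only [pvLtKey, decide_eq_false_iff_not, not_or, not_and, not_lt]; omega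
                have hmg : pvMerge (some ((pvRank "text/plain", i), s)) (some ((3, p), s')) =
                    some ((2, i), s) := by rw [hK]; simp [pvMerge, hlt]
                rw [hmg]
                refine ⟨by simp [pvStagedA, hcj, hcx, hct, ej, ex, hs], ?_⟩
                rintro rk p0 s0 h0
                simp only [Option.some.injEq, Prod.mk.injEq] at h0
                obtain ⟨⟨h5, h6⟩, -⟩ := h0
                exact ⟨by rw [← h5]; simp [pvMinRank, hcj, hcx, hct, ej, ex, hs], by omega⟩
            · -- head rank 3 (mt is not a preferred media type)
              have hK : pvRank mt = 3 := pvRank_other mt h1 h2 h3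
              rcases pvMinRank_cases rest with ⟨e0, est, _⟩ | ⟨e1, ej, est, _⟩ |
                ⟨e2, ej, ex, est, _⟩ | ⟨e3, ej, ex, et, _⟩
              · -- rest has a json schema: the rest wins
                have hr0 : r = 0 := hr.trans e0
                subst hr0
                rw [est] at ih1'
                have hlt : pvLtKey (0, p) (3, i) = true := by simp [pvLtKey]
                have hmg : pvMerge (some ((pvRank mt, i), s)) (some ((0, p), s')) =
                    some ((0, p), s') := by rw [hK]; simp [pvMerge, hlt]
                rw [hmg]
                refine ⟨by simp [pvStagedA, hcj, h1, ih1'], ?_⟩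
                rintro rk p0 s0 h0
                simp only [Option.some.injEq, Prod.mk.injEq] at h0
                obtain ⟨⟨h5, h6⟩, -⟩ := h0
                exact ⟨by rw [← h5]; simp [pvMinRank, hcj, h1, ih1'], by omega⟩
              · -- rest has an xml schema: the rest wins
                have hr1 : r = 1 := hr.trans e1
                subst hr1
                rw [est] at ih1'
                have hlt : pvLtKey (1, p) (3, i) = true := by simp [pvLtKey]
                have hmg : pvMerge (some ((pvRank mt, i), s)) (some ((1, p), s')) =
                    some ((1, p), s') := by rw [hK]; simp [pvMerge, hlt]
                rw [hmg]
                refine ⟨by simp [pvStagedA, hcj, hcx, h1, h2, ej, ih1'], ?_⟩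
                rintro rk p0 s0 h0
                simp only [Option.some.injEq, Prod.mk.injEq] at h0
                obtain ⟨⟨h5, h6⟩, -⟩ := h0
                exact ⟨by rw [← h5]; simp [pvMinRank, hcj, hcx, h1, h2, ej, ih1'], by omega⟩
              · -- rest has a text/plain schema: the rest wins
                have hr2 : r = 2 := hr.trans e2
                subst hr2
                rw [est] at ih1'
                have hlt : pvLtKey (2, p) (3, i) = true := by simp [pvLtKey]
                have hmg : pvMerge (some ((pvRank mt, i), s)) (some ((2, p), s')) =
                    some ((2, p), s') := by rw [hK]; simp [pvMerge, hlt]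
                rw [hmg]
                refine ⟨by simp [pvStagedA, hcj, hcx, hct, h1, h2, h3, ej, ex, ih1'], ?_⟩
                rintro rk p0 s0 h0
                simp only [Option.some.injEq, Prod.mk.injEq] at h0
                obtain ⟨⟨h5, h6⟩, -⟩ := h0
                exact ⟨by rw [← h5]; simp [pvMinRank, hcj, hcx, hct, h1, h2, h3, ej, ex, ih1'],
                  by omega⟩
              · -- both have rank 3: the earlier position (the head) wins
                have hr3 : r = 3 := hr.trans e3
                subst hr3
                have hlt : pvLtKey (3, p) (3, i) = false := by
                  simp only [pvLtKey, decide_eq_false_iff_not, not_or, not_and, not_lt]; omega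
                have hmg : pvMerge (some ((pvRank mt, i), s)) (some ((3, p), s')) =
                    some ((3, i), s) := by rw [hK]; simp [pvMerge, hlt]
                rw [hmg]
                refine ⟨by simp [pvStagedA, hcj, hcx, hct, h1, h2, h3, ej, ex, et, hfall], ?_⟩
                rintro rk p0 s0 h0
                simp only [Option.some.injEq, Prod.mk.injEq] at h0
                obtain ⟨⟨h5, h6⟩, -⟩ := h0
                exact ⟨by rw [← h5]; simp [pvMinRank, hcj, hcx, hct, h1, h2, h3, ej, ex, et],
                  by omega⟩

-- ===== VERDICT (by name: the statement is the Claim_ definition above) =====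
theorem extract_body_schema_py_spec : Claim_equal_extract_body_schema_py := by
  intro body _ hpre
  unfold Spec_extract_body_schema_py extract_body_schema_py extract_body_schema_py_alt
  unfold Pre_extract_body_schema_py at hpre
  rw [pvGet_eq_lookup body "content"]
  cases hb : body.lookup "content" with
  | none => simp [pvA_loop1, pvA_loop2, pvGet, pvB_loop]
  | some c =>
    rw [hb] at hpre
    by_cases hc : c = []
    · subst hc; simp [pvA_loop1, pvA_loop2, pvGet, pvB_loop]
    · simp only [if_neg hc]
      have hnd : (c.map Prod.fst).Nodup := by simpa using hpre
      have h := pvMAIN c hnd 0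
      unfold pvInvQ at h
      rw [pvA_eq_staged]
      exact h.1
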